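-- pv_equiv track=rewrite | github.com/tycyd/codeforces | dfs/1401D Maximum Distributed Tree.py | dfs
-- ===== SOURCE A (Python) =====
-- def dfs(n, uv_dic, node, parent, edg):
--
--     cnt = 1
--     nxt_a = uv_dic[node]
--     for nxt in nxt_a:
--         if nxt[1] != parent:
--             nxtCnt = dfs(n, uv_dic, nxt[1], node, edg)
--             edg[nxt[0]] = nxtCnt * (n - nxtCnt)
--             cnt += nxtCnt
--
--     return cnt
-- ===== SOURCE B (Python) =====
-- def dfs(n, uv_dic, node, parent, edg):
--     size = {}
--     stack = [(node, parent, False)]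
--     while stack:
--         u, p, done = stack.pop()
--         if not done:
--             stack.append((u, p, True))
--             for e in uv_dic[u]:
--                 if e[1] != p:
--                     stack.append((e[1], u, False))
--         else:
--             s = 1
--             for e in uv_dic[u]:
--                 if e[1] != p:
--                     c = size[(e[1], u)]
--                     edg[e[0]] = c * (n - c)
--                     s += c
--             size[(u, p)] = s
--     return size[(node, parent)]
-- ===== Notes on version B (the rewrite author's own statement) =====
-- stated objective: alternative
-- what changed: Recursive DFS replaced by an iterative explicit-stack post-order traversal that maintains a dictionary of subtree sizes per (node,parent) state instead of the call stack; same adjacency lists, same parent-skip, same edge assignments.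
import Mathlib
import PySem

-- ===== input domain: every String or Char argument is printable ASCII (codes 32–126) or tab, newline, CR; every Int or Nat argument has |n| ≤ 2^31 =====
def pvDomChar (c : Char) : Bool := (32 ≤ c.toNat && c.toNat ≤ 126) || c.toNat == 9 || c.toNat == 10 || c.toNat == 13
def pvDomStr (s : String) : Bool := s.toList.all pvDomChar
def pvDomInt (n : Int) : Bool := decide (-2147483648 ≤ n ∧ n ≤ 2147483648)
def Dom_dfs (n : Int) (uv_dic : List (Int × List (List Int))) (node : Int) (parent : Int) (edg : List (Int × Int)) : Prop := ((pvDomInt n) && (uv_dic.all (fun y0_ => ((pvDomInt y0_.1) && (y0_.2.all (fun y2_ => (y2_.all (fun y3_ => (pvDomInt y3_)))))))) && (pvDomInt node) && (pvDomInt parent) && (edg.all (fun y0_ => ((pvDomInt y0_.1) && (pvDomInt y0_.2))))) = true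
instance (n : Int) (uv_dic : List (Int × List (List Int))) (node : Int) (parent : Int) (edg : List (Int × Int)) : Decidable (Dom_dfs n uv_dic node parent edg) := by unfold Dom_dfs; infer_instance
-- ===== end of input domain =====

-- B replaces A's recursion by an iterative explicit-stack post-order traversal with a table of
-- subtree sizes; the proved equivalence is about the RETURN value (both Pythons also fill `edg`
-- in place, with the same final content whenever edge ids are distinct, but that is not claimed).

-- ===== PORT A =====
-- A is recursive on an arbitrary graph; the port totalizes it with a fuel argument that only
-- counts recursion depth (Pre_ guarantees it suffices; on exhaustion the port returns 0,
-- which only happens outside Pre_).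
mutual
def dfsA (n : Int) (uv : PySem.Dict Int (List (List Int))) :
    Nat → Int → Int → PySem.Dict Int Int → Option (Int × PySem.Dict Int Int)
  | 0, _, _, _ => none
  | f+1, node, parent, edg =>
    match uv.get? node with
    | none => none
    | some nxt_a => dfsLoopA n uv f node parent nxt_a 1 edg
termination_by f _ _ _ => (f, 0)

def dfsLoopA (n : Int) (uv : PySem.Dict Int (List (List Int))) :
    Nat → Int → Int → List (List Int) → Int → PySem.Dict Int Int → Option (Int × PySem.Dict Int Int)
  | _, _, _, [], cnt, edg => some (cnt, edg)
  | f, node, parent, nxt :: rest, cnt, edg =>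
    match PySem.List.pyGet? nxt 1 with
    | none => none
    | some w =>
      if w ≠ parent then
        match dfsA n uv f w node edg with
        | none => none
        | some (c, edg1) =>
          match PySem.List.pyGet? nxt 0 with
          | none => none
          | some eid => dfsLoopA n uv f node parent rest (cnt + c) (edg1.insert eid (c * (n - c)))
      else dfsLoopA n uv f node parent rest cnt edg
termination_by f _ _ l _ _ => (f, l.length + 1)
end

def dfs (n : Int) (uv_dic : List (Int × List (List Int))) (node : Int) (parent : Int) (edg : List (Int × Int)) : Int :=
  match dfsA n (PySem.Dict.mk uv_dic) (uv_dic.length * (uv_dic.length + 1) + 2) node parent (PySem.Dict.mk edg) with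
  | some (c, _) => c
  | none => 0

-- ===== PORT B =====
-- collect the child frames pushed by the first (not-done) visit of a node (in list order;
-- the stack pops them in reverse order, as Python's append/pop does)
def pushKids (u p : Int) : List (List Int) → Option (List (Int × Int × Bool))
  | [] => some []
  | e :: es =>
    match PySem.List.pyGet? e 1 with
    | none => none
    | some w =>
      match pushKids u p es with
      | none => none
      | some t => some (if w ≠ p then (w, u, false) :: t else t)

-- the second (done) visit: sum up child sizes and assign the split products to edg
def doneLoopB (n u p : Int) : List (List Int) → Int → PySem.Dict (Int × Int) Int →
    PySem.Dict Int Int → Option (Int × PySem.Dict Int Int)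
  | [], s, _, edg => some (s, edg)
  | e :: es, s, size, edg =>
    match PySem.List.pyGet? e 1 with
    | none => none
    | some w =>
      if w ≠ p then
        match size.get? (w, u) with
        | none => none
        | some c =>
          match PySem.List.pyGet? e 0 with
          | none => none
          | some eid => doneLoopB n u p es (s + c) size (edg.insert eid (c * (n - c)))
      else doneLoopB n u p es s size edg

def runB (n : Int) (uv : PySem.Dict Int (List (List Int))) :
    Nat → List (Int × Int × Bool) → PySem.Dict (Int × Int) Int → PySem.Dict Int Int →
    Option (PySem.Dict (Int × Int) Int × PySem.Dict Int Int)
  | _, [], size, edg => some (size, edg)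
  | 0, _ :: _, _, _ => none
  | f+1, (u, p, false) :: st, size, edg =>
    match uv.get? u with
    | none => none
    | some es =>
      match pushKids u p es with
      | none => none
      | some kids => runB n uv f (kids.reverse ++ (u, p, true) :: st) size edg
  | f+1, (u, p, true) :: st, size, edg =>
    match uv.get? u with
    | none => none
    | some es =>
      match doneLoopB n u p es 1 size edg with
      | none => none
      | some (s, edg') => runB n uv f st (size.insert (u, p) s) edg'

def maxAdjLen : List (Int × List (List Int)) → Nat
  | [] => 0
  | kv :: r => Nat.max kv.2.length (maxAdjLen r)

def dfs_alt (n : Int) (uv_dic : List (Int × List (List Int))) (node : Int) (parent : Int) (edg : List (Int × Int)) : Int :=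
  match runB n (PySem.Dict.mk uv_dic)
      ((2 * maxAdjLen uv_dic + 2) ^ (uv_dic.length * (uv_dic.length + 1) + 2))
      [(node, parent, false)] PySem.Dict.empty (PySem.Dict.mk edg) with
  | some (size, _) => (size.get? (node, parent)).getD 0
  | none => 0

-- ===== PRECONDITION & SPEC =====
-- goodW k u p is a rank-k well-foundedness certificate for the INPUT GRAPH's edge relation with
-- immediate backtracking removed: every node reachable from (u, p) has an adjacency entry, every
-- adjacency item carries at least two ints, and no cycle is reachable (every descending path is
-- shorter than k).  It is a property of uv_dic's adjacency structure alone — it computes none of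
-- the ports' state (no counts, no sizes, no edge products, no stack) — and rank len·(len+1)+2
-- below covers every terminating input because the states of a terminating walk are distinct.
def goodW (uv : PySem.Dict Int (List (List Int))) : Nat → Int → Int → Bool
  | 0, _, _ => false
  | k+1, u, p =>
    match uv.get? u with
    | none => false
    | some es => es.all (fun e =>
        match PySem.List.pyGet? e 1 with
        | none => false
        | some w => w == p || goodW uv k w u)

-- Pre_ = exactly the inputs where the Python A returns: the walk terminates and no
-- KeyError/IndexError occurs (rank bounded by #states + 1 ≤ len·(len+1)+2).
def Pre_dfs (n : Int) (uv_dic : List (Int × List (List Int))) (node : Int) (parent : Int) (edg : List (Int × Int)) : Prop :=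
  goodW (PySem.Dict.mk uv_dic) (uv_dic.length * (uv_dic.length + 1) + 2) node parent = true
instance (n : Int) (uv_dic : List (Int × List (List Int))) (node : Int) (parent : Int) (edg : List (Int × Int)) : Decidable (Pre_dfs n uv_dic node parent edg) := by unfold Pre_dfs; infer_instance

def pvWitness_dfs : Int × (List (Int × List (List Int))) × Int × Int × (List (Int × Int)) :=
  (3, [(1, [[0, 2], [1, 3]]), (2, [[0, 1]]), (3, [[1, 1]])], 1, 0, [])

def Spec_dfs (n : Int) (uv_dic : List (Int × List (List Int))) (node : Int) (parent : Int) (edg : List (Int × Int)) (out : Int) : Prop := out = dfs_alt n uv_dic node parent edg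
instance (n : Int) (uv_dic : List (Int × List (List Int))) (node : Int) (parent : Int) (edg : List (Int × Int)) (out : Int) : Decidable (Spec_dfs n uv_dic node parent edg out) := by unfold Spec_dfs; infer_instance

-- ===== CLAIM (what is proved, stated in full; the proofs are below) =====
def Claim_equal_dfs : Prop := ∀ (n : Int) (uv_dic : List (Int × List (List Int))) (node : Int) (parent : Int) (edg : List (Int × Int)), Dom_dfs n uv_dic node parent edg → Pre_dfs n uv_dic node parent edg → Spec_dfs n uv_dic node parent edg (dfs n uv_dic node parent edg)

-- ===== LEMMAS AND PROOFS =====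
-- the subtree-size value of state (u,p) at rank k (the common value of both ports)
def Vk (uv : PySem.Dict Int (List (List Int))) : Nat → Int → Int → Int
  | 0, _, _ => 0
  | k+1, u, p =>
    match uv.get? u with
    | none => 0
    | some es => es.foldl (fun acc e =>
        match PySem.List.pyGet? e 1 with
        | none => acc
        | some w => if w ≠ p then acc + Vk uv k w u else acc) 1

-- the exact number of runB iterations that state (u,p) costs at rank k
def costB (uv : PySem.Dict Int (List (List Int))) : Nat → Int → Int → Nat
  | 0, _, _ => 0
  | k+1, u, p =>
    match uv.get? u with
    | none => 0
    | some es => 2 + es.foldl (fun a e =>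
        match PySem.List.pyGet? e 1 with
        | none => a
        | some w => if w ≠ p then a + costB uv k w u else a) 0

theorem goodW_succ (uv : PySem.Dict Int (List (List Int))) (k : Nat) (u p : Int) :
    goodW uv (k+1) u p = (match uv.get? u with
      | none => false
      | some es => es.all fun e =>
          match PySem.List.pyGet? e 1 with
          | none => false
          | some w => w == p || goodW uv k w u) := rfl

theorem Vk_succ (uv : PySem.Dict Int (List (List Int))) (k : Nat) (u p : Int) :
    Vk uv (k+1) u p = (match uv.get? u with
      | none => 0
      | some es => es.foldl (fun acc e =>
          match PySem.List.pyGet? e 1 with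
          | none => acc
          | some w => if w ≠ p then acc + Vk uv k w u else acc) 1) := rfl

theorem costB_succ (uv : PySem.Dict Int (List (List Int))) (k : Nat) (u p : Int) :
    costB uv (k+1) u p = (match uv.get? u with
      | none => 0
      | some es => 2 + es.foldl (fun a e =>
          match PySem.List.pyGet? e 1 with
          | none => a
          | some w => if w ≠ p then a + costB uv k w u else a) 0) := rfl

theorem goodW_mono' (uv : PySem.Dict Int (List (List Int))) :
    ∀ k u p, goodW uv k u p = true → goodW uv (k+1) u p = true := by
  intro k
  induction k with
  | zero => intro u p h; simp [goodW] at h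
  | succ k ih =>
    intro u p h
    rw [goodW_succ] at h ⊢
    cases huv : uv.get? u with
    | none => rw [huv] at h; exact Bool.noConfusion h
    | some es =>
      rw [huv] at h; dsimp only at h ⊢
      simp only [List.all_eq_true] at h ⊢
      intro e he
      have hh := h e he
      cases hg : PySem.List.pyGet? e 1 with
      | none => rw [hg] at hh; exact Bool.noConfusion hh
      | some w =>
        rw [hg] at hh; dsimp only at hh ⊢
        simp only [Bool.or_eq_true] at hh ⊢
        rcases hh with h1 | h2
        · exact Or.inl h1
        · exact Or.inr (ih w u h2)

theorem goodW_le' (uv : PySem.Dict Int (List (List Int))) :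
    ∀ k j u p, k ≤ j → goodW uv k u p = true → goodW uv j u p = true := by
  intro k j u p hkj hk
  induction j, hkj using Nat.le_induction with
  | base => exact hk
  | succ j hj ih => exact goodW_mono' uv j u p ih

theorem Vk_stab' (uv : PySem.Dict Int (List (List Int))) :
    ∀ k u p, goodW uv k u p = true → Vk uv (k+1) u p = Vk uv k u p := by
  intro k
  induction k with
  | zero => intro u p h; simp [goodW] at h
  | succ k ih =>
    intro u p h
    rw [goodW_succ] at h
    rw [Vk_succ, Vk_succ]
    cases huv : uv.get? u with
    | none => rw [huv] at h
    | some es =>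
      rw [huv] at h; dsimp only at h ⊢
      simp only [List.all_eq_true] at h
      apply List.foldl_ext
      intro acc e he
      have hh := h e he
      cases hg : PySem.List.pyGet? e 1 with
      | none => rw [hg] at hh
      | some w =>
        rw [hg] at hh; dsimp only at hh ⊢
        by_cases hw : w = p
        · simp [hw]
        · have hwp : (w == p) = false := by simp [hw]
          rw [hwp] at hh; simp only [Bool.false_or] at hh
          simp [hw, ih w u hh]

theorem Vk_le_stab' (uv : PySem.Dict Int (List (List Int))) :
    ∀ k j u p, k ≤ j → goodW uv k u p = true → Vk uv j u p = Vk uv k u p := by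
  intro k j u p hkj hk
  induction j, hkj using Nat.le_induction with
  | base => rfl
  | succ j hj ih =>
    rw [Vk_stab' uv j u p (goodW_le' uv k j u p hj hk)]
    exact ih

theorem Vk_eq' (uv : PySem.Dict Int (List (List Int))) {k j u p : _}
    (hk : goodW uv k u p = true) (hj : goodW uv j u p = true) :
    Vk uv j u p = Vk uv k u p := by
  rcases Nat.le_total k j with h | h
  · exact Vk_le_stab' uv k j u p h hk
  · exact (Vk_le_stab' uv j k u p h hj).symm

theorem pyGet0_of_pyGet1' {e : List Int} {w : Int} (h : PySem.List.pyGet? e 1 = some w) :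
    ∃ a, PySem.List.pyGet? e 0 = some a := by
  cases e with
  | nil => simp [PySem.List.pyGet?, PySem.List.pyIdx?] at h
  | cons a t => exact ⟨a, PySem.List.pyGet?_zero_cons a t⟩

theorem loopA (n : Int) (uv : PySem.Dict Int (List (List Int))) (k f' : Nat) (u p : Int)
    (hk : ∀ w q, goodW uv k w q = true → ∀ edg, ∃ e', dfsA n uv f' w q edg = some (Vk uv k w q, e')) :
    ∀ es, (∀ e ∈ es, (match PySem.List.pyGet? e 1 with
          | none => false
          | some w => w == p || goodW uv k w u) = true) →
      ∀ cnt edg, ∃ e', dfsLoopA n uv f' u p es cnt edg =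
        some (es.foldl (fun acc e =>
          match PySem.List.pyGet? e 1 with
          | none => acc
          | some w => if w ≠ p then acc + Vk uv k w u else acc) cnt, e') := by
  intro es
  induction es with
  | nil => intro _ cnt edg; exact ⟨edg, by simp [dfsLoopA]⟩
  | cons e rest ihes =>
    intro hall cnt edg
    have he := hall e (by simp)
    cases hg : PySem.List.pyGet? e 1 with
    | none => rw [hg] at he; exact Bool.noConfusion he
    | some w =>
      rw [hg] at he; dsimp only at he
      simp only [dfsLoopA]
      rw [hg]
      simp only [List.foldl_cons, hg]
      by_cases hw : w = p
      · have : ¬ (w ≠ p) := by simp [hw]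
        simp only [this, if_false]
        exact ihes (fun e' he' => hall e' (by simp [he'])) cnt edg
      · have hwp : (w == p) = false := by simp [hw]
        rw [hwp] at he; simp only [Bool.false_or] at he
        obtain ⟨e1, hrec⟩ := hk w u he edg
        obtain ⟨eid, h0⟩ := pyGet0_of_pyGet1' hg
        simp only [if_pos hw, hrec, h0]
        exact ihes (fun e' he' => hall e' (by simp [he'])) (cnt + Vk uv k w u)
          (e1.insert eid (Vk uv k w u * (n - Vk uv k w u)))

theorem mainA' (n : Int) (uv : PySem.Dict Int (List (List Int))) :
    ∀ k u p, goodW uv k u p = true → ∀ f, k ≤ f → ∀ edg,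
      ∃ e', dfsA n uv f u p edg = some (Vk uv k u p, e') := by
  intro k
  induction k with
  | zero => intro u p h; simp [goodW] at h
  | succ k ih =>
    intro u p h f hf edg
    obtain ⟨f', rfl⟩ : ∃ f', f = f' + 1 := ⟨f - 1, by omega⟩
    rw [goodW_succ] at h
    simp only [dfsA]
    cases huv : uv.get? u with
    | none => rw [huv] at h; exact Bool.noConfusion h
    | some es =>
      rw [huv] at h; dsimp only at h
      simp only [List.all_eq_true] at h
      rw [Vk_succ, huv]
      exact loopA n uv k f' u p
        (fun w q hg edg' => ih w q hg f' (by omega) edg') es h 1 edg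

def kidsOf (u p : Int) (es : List (List Int)) : List (Int × Int × Bool) :=
  es.filterMap (fun e =>
    match PySem.List.pyGet? e 1 with
    | none => none
    | some w => if w ≠ p then some (w, u, false) else none)

theorem pushKids_ok (u p : Int) :
    ∀ es : List (List Int), (∀ e ∈ es, ∃ w, PySem.List.pyGet? e 1 = some w) →
      pushKids u p es = some (kidsOf u p es) := by
  intro es
  induction es with
  | nil => intro _; simp [pushKids, kidsOf]
  | cons e rest ih =>
    intro hall
    obtain ⟨w, hg⟩ := hall e (by simp)
    simp only [pushKids, hg, ih (fun e' he' => hall e' (by simp [he'])), kidsOf,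
      List.filterMap_cons]
    by_cases hw : w ≠ p
    · simp [hw]
    · simp [hw]

theorem kids_mem {e : List Int} {es : List (List Int)} {u p w : Int}
    (he : e ∈ es) (hg : PySem.List.pyGet? e 1 = some w) (hw : w ≠ p) :
    (w, u, false) ∈ kidsOf u p es := by
  refine List.mem_filterMap.2 ⟨e, he, ?_⟩
  simp [hg, hw]

theorem kids_shape {fr : Int × Int × Bool} {u p : Int} {es : List (List Int)}
    (h : fr ∈ kidsOf u p es) :
    ∃ e w, e ∈ es ∧ PySem.List.pyGet? e 1 = some w ∧ w ≠ p ∧ fr = (w, u, false) := by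
  obtain ⟨e, he, heq⟩ := List.mem_filterMap.1 h
  cases hg : PySem.List.pyGet? e 1 with
  | none => rw [hg] at heq; simp at heq
  | some w =>
    rw [hg] at heq; dsimp only at heq
    by_cases hw : w ≠ p
    · rw [if_pos hw] at heq
      exact ⟨e, w, he, hg, hw, (Option.some_inj.1 heq).symm⟩
    · rw [if_neg hw] at heq; simp at heq

theorem sumKids (uv : PySem.Dict Int (List (List Int))) (k : Nat) (u p : Int) :
    ∀ (es : List (List Int)) (a : Nat),
      es.foldl (fun a e =>
        match PySem.List.pyGet? e 1 with
        | none => a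
        | some w => if w ≠ p then a + costB uv k w u else a) a
      = a + ((kidsOf u p es).map (fun fr => costB uv k fr.1 fr.2.1)).sum := by
  intro es
  induction es with
  | nil => intro a; simp [kidsOf]
  | cons e rest ih =>
    intro a
    cases hg : PySem.List.pyGet? e 1 with
    | none =>
      have hk : kidsOf u p (e :: rest) = kidsOf u p rest := by
        simp [kidsOf, hg]
      simp only [List.foldl_cons, hg]
      rw [hk]
      exact ih a
    | some w =>
      by_cases hw : w ≠ p
      · have hk : kidsOf u p (e :: rest) = (w, u, false) :: kidsOf u p rest := by
          simp [kidsOf, hg, hw]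
        simp only [List.foldl_cons, hg, if_pos hw]
        rw [hk, ih (a + costB uv k w u)]
        simp only [List.map_cons, List.sum_cons]
        omega
      · have hk : kidsOf u p (e :: rest) = kidsOf u p rest := by
          simp [kidsOf, hg, hw]
        simp only [List.foldl_cons, hg, if_neg hw]
        rw [hk]
        exact ih a

theorem doneOK (n : Int) (uv : PySem.Dict Int (List (List Int))) (k : Nat) (u p : Int)
    (size : PySem.Dict (Int × Int) Int) :
    ∀ es, (∀ e ∈ es, ∃ w, PySem.List.pyGet? e 1 = some w ∧
        (w = p ∨ size.get? (w, u) = some (Vk uv k w u))) →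
      ∀ (s : Int) (edg : PySem.Dict Int Int),
        ∃ edg2, doneLoopB n u p es s size edg =
          some (es.foldl (fun acc e =>
            match PySem.List.pyGet? e 1 with
            | none => acc
            | some w => if w ≠ p then acc + Vk uv k w u else acc) s, edg2) := by
  intro es
  induction es with
  | nil => intro _ s edg; exact ⟨edg, by simp [doneLoopB]⟩
  | cons e rest ih =>
    intro hall s edg
    obtain ⟨w, hg, hor⟩ := hall e (by simp)
    simp only [doneLoopB, hg, List.foldl_cons]
    by_cases hw : w ≠ p
    · rcases hor with h1 | h2
      · exact absurd h1 hw
      · obtain ⟨eid, h0⟩ := pyGet0_of_pyGet1' hg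
        simp only [if_pos hw, h2, h0]
        exact ih (fun e' he' => hall e' (by simp [he'])) (s + Vk uv k w u)
          (edg.insert eid (Vk uv k w u * (n - Vk uv k w u)))
    · simp only [if_neg hw]
      exact ih (fun e' he' => hall e' (by simp [he'])) s edg

def Coh' (uv : PySem.Dict Int (List (List Int))) (size : PySem.Dict (Int × Int) Int) : Prop :=
  ∀ u p v, size.get? (u, p) = some v → ∃ j, goodW uv j u p = true ∧ v = Vk uv j u p

theorem kidsRun (n : Int) (uv : PySem.Dict Int (List (List Int))) (k : Nat)
    (hone : ∀ u p, goodW uv k u p = true → ∀ st size edg f, Coh' uv size →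
      ∃ size' edg',
        runB n uv (f + costB uv k u p) ((u, p, false) :: st) size edg = runB n uv f st size' edg' ∧
        Coh' uv size' ∧ (∀ t v, size.get? t = some v → size'.get? t = some v) ∧
        size'.get? (u, p) = some (Vk uv k u p)) :
    ∀ ks, (∀ fr ∈ ks, ∃ w u', fr = (w, u', false) ∧ goodW uv k w u' = true) →
      ∀ st size edg f, Coh' uv size →
      ∃ size' edg',
        runB n uv (f + (ks.map (fun fr => costB uv k fr.1 fr.2.1)).sum) (ks ++ st) size edg
          = runB n uv f st size' edg' ∧
        Coh' uv size' ∧ (∀ t v, size.get? t = some v → size'.get? t = some v) ∧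
        (∀ fr ∈ ks, size'.get? (fr.1, fr.2.1) = some (Vk uv k fr.1 fr.2.1)) := by
  intro ks
  induction ks with
  | nil =>
    intro _ st size edg f hcoh
    exact ⟨size, edg, by simp, hcoh, fun t v h => h, by simp⟩
  | cons fr ks ih =>
    intro hall st size edg f hcoh
    obtain ⟨w, u', hfr, hgood⟩ := hall fr (by simp)
    subst hfr
    have hfuel : f + ((((w, u', false) :: ks).map (fun fr => costB uv k fr.1 fr.2.1)).sum)
        = (f + (ks.map (fun fr => costB uv k fr.1 fr.2.1)).sum) + costB uv k w u' := by
      simp only [List.map_cons, List.sum_cons]; omega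
    rw [hfuel]
    obtain ⟨size1, edg1, hrun1, hcoh1, hmono1, hget1⟩ :=
      hone w u' hgood (ks ++ st) size edg (f + (ks.map (fun fr => costB uv k fr.1 fr.2.1)).sum) hcoh
    rw [List.cons_append, hrun1]
    obtain ⟨size2, edg2, hrun2, hcoh2, hmono2, hget2⟩ := ih
      (fun fr h => hall fr (by simp [h])) st size1 edg1 f hcoh1
    refine ⟨size2, edg2, hrun2, hcoh2, fun t v h => hmono2 t v (hmono1 t v h), ?_⟩
    intro fr hmem
    rcases List.mem_cons.1 hmem with rfl | hmem'
    · exact hmono2 _ _ hget1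
    · exact hget2 fr hmem'

theorem mainB' (n : Int) (uv : PySem.Dict Int (List (List Int))) :
    ∀ k u p, goodW uv k u p = true → ∀ st size edg f, Coh' uv size →
      ∃ size' edg',
        runB n uv (f + costB uv k u p) ((u, p, false) :: st) size edg = runB n uv f st size' edg' ∧
        Coh' uv size' ∧ (∀ t v, size.get? t = some v → size'.get? t = some v) ∧
        size'.get? (u, p) = some (Vk uv k u p) := by
  intro k
  induction k with
  | zero => intro u p h; simp [goodW] at h
  | succ k ih =>
    intro u p h st size edg f hcoh
    have h0 := h
    rw [goodW_succ] at h
    cases huv : uv.get? u with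
    | none => rw [huv] at h; exact Bool.noConfusion h
    | some es =>
      rw [huv] at h; dsimp only at h
      simp only [List.all_eq_true] at h
      have hsome : ∀ e ∈ es, ∃ w, PySem.List.pyGet? e 1 = some w := by
        intro e he
        have hh := h e he
        cases hg : PySem.List.pyGet? e 1 with
        | none => rw [hg] at hh; exact Bool.noConfusion hh
        | some w => exact ⟨w, rfl⟩
      have hcost : costB uv (k+1) u p
          = 2 + ((kidsOf u p es).map (fun fr => costB uv k fr.1 fr.2.1)).sum := by
        rw [costB_succ, huv]
        dsimp only
        rw [sumKids uv k u p es 0, Nat.zero_add]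
      have hfuel : f + costB uv (k+1) u p
          = ((f + 1) + (((kidsOf u p es).reverse).map (fun fr => costB uv k fr.1 fr.2.1)).sum) + 1 := by
        rw [hcost, List.map_reverse, List.sum_reverse]
        omega
      rw [hfuel]
      simp only [runB]
      rw [huv]
      dsimp only
      rw [pushKids_ok u p es hsome]
      dsimp only
      have hframes : ∀ fr ∈ (kidsOf u p es).reverse,
          ∃ w u', fr = (w, u', false) ∧ goodW uv k w u' = true := by
        intro fr hfr
        obtain ⟨e, w, he, hg, hw, rfl⟩ := kids_shape (List.mem_reverse.1 hfr)
        have hh := h e he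
        rw [hg] at hh; dsimp only at hh
        have hwp : (w == p) = false := by simp [hw]
        rw [hwp] at hh; simp only [Bool.false_or] at hh
        exact ⟨w, u, rfl, hh⟩
      obtain ⟨size1, edg1, hrun1, hcoh1, hmono1, hget1⟩ :=
        kidsRun n uv k ih ((kidsOf u p es).reverse) hframes ((u, p, true) :: st) size edg (f + 1) hcoh
      rw [hrun1]
      have hes2 : ∀ e ∈ es, ∃ w, PySem.List.pyGet? e 1 = some w ∧
          (w = p ∨ size1.get? (w, u) = some (Vk uv k w u)) := by
        intro e he
        have hh := h e he
        obtain ⟨w, hg⟩ := hsome e he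
        refine ⟨w, hg, ?_⟩
        by_cases hw : w = p
        · exact Or.inl hw
        · rw [hg] at hh; dsimp only at hh
          have hwp : (w == p) = false := by simp [hw]
          rw [hwp] at hh; simp only [Bool.false_or] at hh
          have hmem : (w, u, false) ∈ (kidsOf u p es).reverse :=
            List.mem_reverse.2 (kids_mem he hg hw)
          exact Or.inr (hget1 (w, u, false) hmem)
      obtain ⟨edg2, hdone⟩ := doneOK n uv k u p size1 es hes2 1 edg1
      simp only [runB]
      rw [huv]
      dsimp only
      rw [hdone]
      dsimp only
      have hval : es.foldl (fun acc e =>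
          match PySem.List.pyGet? e 1 with
          | none => acc
          | some w => if w ≠ p then acc + Vk uv k w u else acc) 1 = Vk uv (k+1) u p := by
        rw [Vk_succ, huv]

      rw [hval]
      refine ⟨size1.insert (u, p) (Vk uv (k+1) u p), edg2, rfl, ?_, ?_, ?_⟩
      · intro a b v hv
        by_cases hab : ((a, b) : Int × Int) = (u, p)
        · obtain ⟨rfl, rfl⟩ := Prod.mk.inj hab
          rw [PySem.Dict.get?_insert_self] at hv
          exact ⟨k+1, h0, (Option.some_inj.1 hv).symm⟩
        · rw [PySem.Dict.get?_insert_of_ne _ _ hab] at hv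
          exact hcoh1 a b v hv
      · intro t v hv
        obtain ⟨a, b⟩ := t
        by_cases ht : ((a, b) : Int × Int) = (u, p)
        · obtain ⟨rfl, rfl⟩ := Prod.mk.inj ht
          obtain ⟨j, hj, rfl⟩ := hcoh a b v hv
          rw [PySem.Dict.get?_insert_self, Vk_eq' uv hj h0]
        · rw [PySem.Dict.get?_insert_of_ne _ _ ht]
          exact hmono1 (a, b) v hv
      · exact PySem.Dict.get?_insert_self _ _ _

theorem foldCost (uv : PySem.Dict Int (List (List Int))) (k : Nat) (u p : Int) (B : Nat)
    (hB : ∀ w u', costB uv k w u' ≤ B) :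
    ∀ (es : List (List Int)) (a : Nat),
      es.foldl (fun a e =>
        match PySem.List.pyGet? e 1 with
        | none => a
        | some w => if w ≠ p then a + costB uv k w u else a) a ≤ a + es.length * B := by
  intro es
  induction es with
  | nil => intro a; simp
  | cons e rest ih =>
    intro a
    simp only [List.foldl_cons, List.length_cons]
    cases hg : PySem.List.pyGet? e 1 with
    | none =>
      calc rest.foldl _ a ≤ a + rest.length * B := ih a
        _ ≤ a + (rest.length + 1) * B := by nlinarith
    | some w =>
      by_cases hw : w ≠ p
      · simp only [if_pos hw]
        calc rest.foldl _ (a + costB uv k w u) ≤ (a + costB uv k w u) + rest.length * B := ih _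
          _ ≤ a + (rest.length + 1) * B := by
              have := hB w u
              nlinarith
      · simp only [if_neg hw]
        calc rest.foldl _ a ≤ a + rest.length * B := ih a
          _ ≤ a + (rest.length + 1) * B := by nlinarith

theorem costB_le' (uv : PySem.Dict Int (List (List Int))) (M : Nat)
    (hval : ∀ u es, uv.get? u = some es → es.length ≤ M) :
    ∀ k u p, costB uv k u p ≤ (2 * M + 2) ^ k := by
  intro k
  induction k with
  | zero => intro u p; simp [costB]
  | succ k ih =>
    intro u p
    rw [costB_succ]
    cases huv : uv.get? u with
    | none => positivity
    | some es =>
      dsimp only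
      have hlen := hval u es huv
      have hfold := foldCost uv k u p ((2 * M + 2) ^ k) (fun w u' => ih w u') es 0
      have hB1 : 1 ≤ (2 * M + 2) ^ k := Nat.one_le_pow _ _ (by omega)
      have : (2 * M + 2) ^ (k + 1) = (2 * M + 2) ^ k * (2 * M + 2) := pow_succ _ _
      nlinarith

theorem maxAdjLen_val' (l : List (Int × List (List Int))) :
    ∀ u es, (PySem.Dict.mk l).get? u = some es → es.length ≤ maxAdjLen l := by
  induction l with
  | nil => intro u es h; simp [PySem.Dict.get?] at h
  | cons kv rest ih =>
    intro u es h
    obtain ⟨a, v⟩ := kv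
    rw [PySem.Dict.get?_mk_cons] at h
    by_cases hau : (a == u) = true
    · rw [if_pos hau] at h
      have : es = v := (Option.some_inj.1 h).symm
      subst this
      exact le_trans (Nat.le_refl _) (Nat.le_max_left _ _)
    · rw [if_neg (by simpa using hau)] at h
      exact le_trans (ih u es h) (Nat.le_max_right _ _)

theorem coh_empty (uv : PySem.Dict Int (List (List Int))) : Coh' uv PySem.Dict.empty := by
  intro u p v h
  rw [PySem.Dict.get?_empty] at h
  simp at h

-- ===== VERDICT (by name: the statement is the Claim_ definition above) =====
theorem dfs_spec : Claim_equal_dfs := by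
  intro n uv_dic node parent edg _ hpre
  unfold Spec_dfs
  unfold Pre_dfs at hpre
  have hgood := hpre
  obtain ⟨eA, hA⟩ := mainA' n (PySem.Dict.mk uv_dic)
    (uv_dic.length * (uv_dic.length + 1) + 2) node parent hgood
    (uv_dic.length * (uv_dic.length + 1) + 2) (Nat.le_refl _) (PySem.Dict.mk edg)
  have hle : costB (PySem.Dict.mk uv_dic) (uv_dic.length * (uv_dic.length + 1) + 2) node parent
      ≤ (2 * maxAdjLen uv_dic + 2) ^ (uv_dic.length * (uv_dic.length + 1) + 2) :=
    costB_le' (PySem.Dict.mk uv_dic) (maxAdjLen uv_dic) (maxAdjLen_val' uv_dic) _ node parent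
  obtain ⟨size', edg', hrun, _, _, hgetv⟩ := mainB' n (PySem.Dict.mk uv_dic)
    (uv_dic.length * (uv_dic.length + 1) + 2) node parent hgood
    [] PySem.Dict.empty (PySem.Dict.mk edg)
    ((2 * maxAdjLen uv_dic + 2) ^ (uv_dic.length * (uv_dic.length + 1) + 2)
      - costB (PySem.Dict.mk uv_dic) (uv_dic.length * (uv_dic.length + 1) + 2) node parent)
    (coh_empty _)
  unfold dfs dfs_alt
  rw [show (2 * maxAdjLen uv_dic + 2) ^ (uv_dic.length * (uv_dic.length + 1) + 2)
      = ((2 * maxAdjLen uv_dic + 2) ^ (uv_dic.length * (uv_dic.length + 1) + 2)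
          - costB (PySem.Dict.mk uv_dic) (uv_dic.length * (uv_dic.length + 1) + 2) node parent)
        + costB (PySem.Dict.mk uv_dic) (uv_dic.length * (uv_dic.length + 1) + 2) node parent
    from (Nat.sub_add_cancel hle).symm]
  rw [hA, hrun]
  simp only [runB]
  rw [hgetv]
  rfl
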